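-- pv_equiv track=rewrite | github.com/minahYu/algorithm | 프로그래머스/1/12915. 문자열 내 마음대로 정렬하기/문자열 내 마음대로 정렬하기.py | solution
-- ===== SOURCE A (Python) =====
-- def solution(strings, n):
--     answer = []
--     dic = dict()
--
--     strings.sort()
--     for string in strings:
--         dic[string] = string[n]
--
--     answer = sorted(dic, key=lambda item:item[n])
--
--     return answer
-- ===== SOURCE B (Python) =====
-- def solution(strings, n):
--     strings.sort()
--     seen = set()
--     buckets = {}
--     for s in strings:
--         if s in seen:
--             continue
--         seen.add(s)
--         buckets.setdefault(s[n], []).append(s)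
--     answer = []
--     for c in sorted(buckets):
--         answer.extend(buckets[c])
--     return answer
-- ===== Notes on version B (the rewrite author's own statement) =====
-- stated objective: alternative
-- what changed: Replaces the single stable key-sort over the dict's keys by a one-pass group-by: after the lexical in-place sort, a seen-set dedup pass fills per-nth-char buckets (each kept in lexical order) and the answer is the concatenation of the buckets in sorted key order.
import Mathlib
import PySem

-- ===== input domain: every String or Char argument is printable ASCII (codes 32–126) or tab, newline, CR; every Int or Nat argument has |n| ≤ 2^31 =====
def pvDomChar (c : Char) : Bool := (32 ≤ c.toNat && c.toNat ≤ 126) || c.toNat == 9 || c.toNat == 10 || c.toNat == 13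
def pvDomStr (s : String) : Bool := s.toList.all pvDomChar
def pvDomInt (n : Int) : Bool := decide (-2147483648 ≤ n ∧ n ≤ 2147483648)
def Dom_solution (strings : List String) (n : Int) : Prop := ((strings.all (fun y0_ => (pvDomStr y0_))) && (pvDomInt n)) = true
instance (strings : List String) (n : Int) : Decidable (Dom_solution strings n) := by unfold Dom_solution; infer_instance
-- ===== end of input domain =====

-- B replaces A's stable key-sort of the deduplicated sorted list by a group-by-nth-char
-- bucketing pass (seen-set dedup, per-char buckets) concatenated in sorted key order
-- (objective: alternative). Both Pythons sort `strings` in place; the equivalence proved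
-- here is about the return value (B performs the same in-place sort).


-- shared helper: Python's string[n]; the ' ' default is never reached inside Pre_solution
def pyCharAt (n : Int) (s : String) : Char := (PySem.Str.pyGet? s n).getD ' '

-- ===== PORT A =====
def solution (strings : List String) (n : Int) : List String :=
  let ss := PySem.List.sorted strings (fun x => x)
  let dic := ss.foldl (fun d s => d.insert s (pyCharAt n s)) PySem.Dict.empty
  PySem.List.sorted dic.keys (fun s => pyCharAt n s)

-- ===== PORT B =====
def solution_alt (strings : List String) (n : Int) : List String :=
  let ss := PySem.List.sorted strings (fun x => x)
  let st := ss.foldl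
    (fun (p : PySem.Set String × PySem.Dict Char (List String)) s =>
      if PySem.Set.contains p.1 s then p
      else (PySem.Set.add p.1 s, p.2.modify (pyCharAt n s) [] (fun b => b ++ [s])))
    (PySem.Set.empty, PySem.Dict.empty)
  let buckets := st.2
  (PySem.List.sorted buckets.keys (fun c => c)).foldl (fun acc c => acc ++ buckets.getD c []) []

-- ===== PRECONDITION & SPEC =====
-- Pre_ excludes exactly the inputs on which Python A raises IndexError: some string in the
-- list has no character at (possibly negative) index n.
def Pre_solution (strings : List String) (n : Int) : Prop :=
  ∀ s ∈ strings, PySem.Raise.InRange s.toList.length n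
instance (strings : List String) (n : Int) : Decidable (Pre_solution strings n) := by
  unfold Pre_solution; infer_instance
def pvWitness_solution : List String × Int := (["ba", "ab", "cb", "ab"], 1)
def Spec_solution (strings : List String) (n : Int) (out : List String) : Prop := out = solution_alt strings n
instance (strings : List String) (n : Int) (out : List String) : Decidable (Spec_solution strings n out) := by unfold Spec_solution; infer_instance

-- ===== CLAIM (what is proved, stated in full; the proofs are below) =====
def Claim_equal_solution : Prop := ∀ (strings : List String) (n : Int), Dom_solution strings n → Pre_solution strings n → Spec_solution strings n (solution strings n)

-- ===== LEMMAS AND PROOFS =====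

-- the strict (nth char, then whole string) lexicographic order that both results obey
def newElems (seen : PySem.Set String) : List String → List String
  | [] => []
  | x :: t => if PySem.Set.contains seen x then newElems seen t
              else x :: newElems (PySem.Set.add seen x) t

theorem update_eq_append_newElems (seen : PySem.Set String) (ss : List String) :
    PySem.Set.update seen ss = seen ++ newElems seen ss := by
  induction ss generalizing seen with
  | nil => simp [PySem.Set.update, newElems]
  | cons x t ih =>
    have hstep : PySem.Set.update seen (x :: t) = PySem.Set.update (PySem.Set.add seen x) t := by
      simp [PySem.Set.update]
    by_cases h : PySem.Set.contains seen x = true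
    · have hm : x ∈ seen := by simpa [PySem.Set.contains] using h
      have hadd : PySem.Set.add seen x = seen := by simp [PySem.Set.add, hm]
      rw [hstep, hadd, ih]
      simp [newElems, hm]
    · have hm : x ∉ seen := by simpa [PySem.Set.contains] using h
      have hadd : PySem.Set.add seen x = seen ++ [x] := by simp [PySem.Set.add, hm]
      rw [hstep, ih]
      simp [newElems, hm]

theorem newElems_nil (ss : List String) : newElems [] ss = PySem.Set.ofList ss := by
  have := update_eq_append_newElems [] ss
  simpa [PySem.Set.ofList, PySem.Set.update, PySem.Set.empty] using this.symm

theorem loopB_eq (n : Int) (ss : List String) (seen : PySem.Set String)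
    (d : PySem.Dict Char (List String)) :
    ss.foldl
      (fun (p : PySem.Set String × PySem.Dict Char (List String)) s =>
        if PySem.Set.contains p.1 s then p
        else (PySem.Set.add p.1 s, p.2.modify (pyCharAt n s) [] (fun b => b ++ [s])))
      (seen, d)
    = (PySem.Set.update seen ss,
       (newElems seen ss).foldl (fun d s => d.modify (pyCharAt n s) [] (fun b => b ++ [s])) d) := by
  induction ss generalizing seen d with
  | nil => simp [PySem.Set.update, newElems]
  | cons x t ih =>
    by_cases h : PySem.Set.contains seen x = true
    · have hm : x ∈ seen := by simpa [PySem.Set.contains] using h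
      have hadd : PySem.Set.add seen x = seen := by simp [PySem.Set.add, hm]
      simp only [List.foldl_cons, h, if_pos]
      rw [ih]
      have : PySem.Set.update seen (x :: t) = PySem.Set.update seen t := by
        simp [PySem.Set.update, hadd]
      rw [this]
      simp [newElems, hm]
    · simp only [List.foldl_cons, h, if_neg, Bool.not_eq_true]
      rw [ih]
      have hm : x ∉ seen := by simpa [PySem.Set.contains] using h
      have : PySem.Set.update seen (x :: t) = PySem.Set.update (PySem.Set.add seen x) t := by
        simp [PySem.Set.update]
      rw [this]
      simp [newElems, hm]

def rLex (n : Int) (a b : String) : Prop :=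
  pyCharAt n a < pyCharAt n b ∨ (pyCharAt n a = pyCharAt n b ∧ a < b)

theorem rLex_antisymm (n : Int) (a b : String) (h1 : rLex n a b) (h2 : rLex n b a) : a = b := by
  rcases h1 with h1 | ⟨e1, l1⟩ <;> rcases h2 with h2 | ⟨e2, l2⟩
  · exact absurd h2 (lt_asymm h1)
  · exact absurd h1 (by rw [e2]; exact lt_irrefl _)
  · exact absurd h2 (by rw [e1]; exact lt_irrefl _)
  · exact absurd l2 (lt_asymm l1)

theorem rLex_ne (n : Int) (a b : String) (h : rLex n a b) : a ≠ b := by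
  rintro rfl
  rcases h with h | ⟨_, h⟩ <;> exact lt_irrefl _ h

theorem newElems_sublist (seen : PySem.Set String) (ss : List String) :
    (newElems seen ss).Sublist ss := by
  induction ss generalizing seen with
  | nil => simp [newElems]
  | cons x t ih =>
    by_cases h : PySem.Set.contains seen x = true
    · simp only [newElems, h, if_pos]
      exact (ih seen).cons x
    · simp only [newElems, h, if_neg, Bool.not_eq_true]
      exact (ih (PySem.Set.add seen x)).cons₂ x

theorem insertBy_pairwise (n : Int) (x : String) (ys : List String)
    (hp : ys.Pairwise (rLex n)) (hlt : ∀ y ∈ ys, y < x) :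
    (PySem.List.insertBy (fun a b => decide (pyCharAt n a < pyCharAt n b)) x ys).Pairwise (rLex n) := by
  induction ys with
  | nil => simp [PySem.List.insertBy, rLex]
  | cons y t ih =>
    rw [List.pairwise_cons] at hp
    obtain ⟨hy, hpt⟩ := hp
    simp only [PySem.List.insertBy]
    by_cases hb : pyCharAt n x < pyCharAt n y
    · simp only [hb, decide_true, if_pos]
      refine List.Pairwise.cons ?_ (List.pairwise_cons.mpr ⟨hy, hpt⟩)
      intro z hz
      rcases List.mem_cons.mp hz with rfl | hz
      · exact Or.inl hb
      · refine Or.inl (lt_of_lt_of_le hb ?_)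
        rcases hy z hz with h | ⟨e, _⟩
        · exact le_of_lt h
        · exact le_of_eq e
    · simp only [hb, decide_false, if_neg, Bool.false_eq_true, not_false_eq_true]
      refine List.Pairwise.cons ?_ (ih hpt (fun z hz => hlt z (List.mem_cons_of_mem y hz)))
      intro z hz
      rw [PySem.List.mem_insertBy] at hz
      rcases hz with rfl | hz
      · rcases lt_or_eq_of_le (not_lt.mp hb) with h | h
        · exact Or.inl h
        · exact Or.inr ⟨h, hlt y List.mem_cons_self⟩
      · exact hy z hz

theorem foldl_insertBy_pairwise (n : Int) (l : List String) (acc : List String)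
    (hacc : acc.Pairwise (rLex n))
    (hcross : ∀ y ∈ acc, ∀ x ∈ l, y < x)
    (hl : l.Pairwise (· < ·)) :
    (l.foldl (fun acc x => PySem.List.insertBy (fun a b => decide (pyCharAt n a < pyCharAt n b)) x acc) acc).Pairwise (rLex n) := by
  induction l generalizing acc with
  | nil => simpa using hacc
  | cons x t ih =>
    rw [List.pairwise_cons] at hl
    obtain ⟨hx, ht⟩ := hl
    simp only [List.foldl_cons]
    refine ih _ ?_ ?_ ht
    · exact insertBy_pairwise n x acc hacc (fun y hy => hcross y hy x List.mem_cons_self)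
    · intro y hy z hz
      rw [PySem.List.mem_insertBy] at hy
      rcases hy with rfl | hy
      · exact hx z hz
      · exact hcross y hy z (List.mem_cons_of_mem x hz)

theorem bucket_getD (n : Int) (c : Char) (D : List String) :
    (D.foldl (fun d s => d.modify (pyCharAt n s) [] (fun b => b ++ [s])) PySem.Dict.empty).getD c []
    = D.filter (fun s => pyCharAt n s == c) := by
  have h := PySem.Dict.getD_foldl_modify_append (D.map (fun s => (pyCharAt n s, s))) PySem.Dict.empty c
  rw [List.foldl_map] at h
  simpa [List.filter_map, List.map_map, Function.comp_def] using h

theorem main_eq (strings : List String) (n : Int) :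
    PySem.List.sorted (PySem.Set.ofList (PySem.List.sorted strings (fun x => x))) (fun s => pyCharAt n s)
    = (PySem.List.sorted (PySem.Set.ofList ((PySem.Set.ofList (PySem.List.sorted strings (fun x => x))).map (fun s => pyCharAt n s))) (fun c => c)).flatMap
        (fun c => (PySem.Set.ofList (PySem.List.sorted strings (fun x => x))).filter (fun s => pyCharAt n s == c)) := by
  set ss := PySem.List.sorted strings (fun x => x) with hss_def
  set D := PySem.Set.ofList ss with hD_def
  set C := PySem.List.sorted (PySem.Set.ofList (D.map (fun s => pyCharAt n s))) (fun c => c) with hC_def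
  have hss : ss.Pairwise (· ≤ ·) := PySem.List.sorted_pairwise strings (fun x => x)
  have hsub : D.Sublist ss := by rw [hD_def, ← newElems_nil]; exact newElems_sublist [] ss
  have hnd : D.Nodup := PySem.Set.nodup_ofList ss
  have hD_lt : D.Pairwise (· < ·) :=
    (List.Pairwise.sublist hsub hss).and hnd |>.imp (fun h => lt_of_le_of_ne h.1 h.2)
  have hA : (PySem.List.sorted D (fun s => pyCharAt n s)).Pairwise (rLex n) := by
    rw [PySem.List.sorted_eq_foldl_insertBy]
    exact foldl_insertBy_pairwise n D [] (by simp) (by simp) hD_lt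
  have hB : (C.flatMap (fun c => D.filter (fun s => pyCharAt n s == c))).Pairwise (rLex n) := by
    rw [List.pairwise_flatMap]
    constructor
    · intro c _
      refine (hD_lt.filter (fun s => pyCharAt n s == c)).imp_of_mem ?_
      intro a b ha hb hab
      have ea : pyCharAt n a = c := by simpa using (List.mem_filter.mp ha).2
      have eb : pyCharAt n b = c := by simpa using (List.mem_filter.mp hb).2
      exact Or.inr ⟨ea.trans eb.symm, hab⟩
    · have hC : C.Pairwise (· < ·) := PySem.List.sorted_ofList_pairwise_lt (D.map (fun s => pyCharAt n s))
      refine hC.imp ?_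
      intro c c' h x hx y hy
      have ex : pyCharAt n x = c := by simpa using (List.mem_filter.mp hx).2
      have ey : pyCharAt n y = c' := by simpa using (List.mem_filter.mp hy).2
      exact Or.inl (by rw [ex, ey]; exact h)
  have hndB : (C.flatMap (fun c => D.filter (fun s => pyCharAt n s == c))).Nodup :=
    hB.imp (fun h => rLex_ne n _ _ h)
  have hmem : ∀ a, a ∈ C.flatMap (fun c => D.filter (fun s => pyCharAt n s == c)) ↔ a ∈ D := by
    intro a
    constructor
    · intro h
      obtain ⟨c, _, ha⟩ := List.mem_flatMap.mp h
      exact (List.mem_filter.mp ha).1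
    · intro h
      refine List.mem_flatMap.mpr ⟨pyCharAt n a, ?_, ?_⟩
      · rw [hC_def, PySem.List.mem_sorted, PySem.Set.mem_ofList]
        exact List.mem_map.mpr ⟨a, h, rfl⟩
      · exact List.mem_filter.mpr ⟨h, by simp⟩
    
  have hperm : (PySem.List.sorted D (fun s => pyCharAt n s)).Perm
      (C.flatMap (fun c => D.filter (fun s => pyCharAt n s == c))) :=
    (PySem.List.sorted_perm D _ false).trans
      (((List.perm_ext_iff_of_nodup hndB hnd).mpr hmem).symm)
  exact List.Perm.eq_of_pairwise (fun a b _ _ h1 h2 => rLex_antisymm n a b h1 h2) hA hB hperm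

theorem solution_eq_alt (strings : List String) (n : Int) : solution strings n = solution_alt strings n := by
  simp only [solution, solution_alt]
  rw [loopB_eq n]
  have hseen : (PySem.Set.empty : PySem.Set String) = [] := rfl
  rw [hseen, newElems_nil]
  have hkeysA : (List.foldl (fun d s => d.insert s (pyCharAt n s)) PySem.Dict.empty
      (PySem.List.sorted strings (fun x => x))).keys
      = PySem.Set.ofList (PySem.List.sorted strings (fun x => x)) := by
    rw [PySem.Dict.keys_foldl_insert]
    rfl
  have hkeysB : ((PySem.Set.ofList (PySem.List.sorted strings (fun x => x))).foldl
      (fun d s => d.modify (pyCharAt n s) [] (fun b => b ++ [s])) PySem.Dict.empty).keys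
      = PySem.Set.ofList ((PySem.Set.ofList (PySem.List.sorted strings (fun x => x))).map (fun s => pyCharAt n s)) := by
    rw [PySem.Dict.keys_foldl_modify_key]
    rfl
  rw [hkeysA, hkeysB, PySem.List.foldl_append_eq_flatMap]
  simp only [List.nil_append]
  have hbkt : ∀ c, ((PySem.Set.ofList (PySem.List.sorted strings (fun x => x))).foldl
      (fun d s => d.modify (pyCharAt n s) [] (fun b => b ++ [s])) PySem.Dict.empty).getD c []
      = (PySem.Set.ofList (PySem.List.sorted strings (fun x => x))).filter (fun s => pyCharAt n s == c) :=
    fun c => bucket_getD n c _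
  simp only [hbkt]
  exact main_eq strings n

-- ===== VERDICT (by name: the statement is the Claim_ definition above) =====
theorem solution_spec : Claim_equal_solution := by
  intro strings n _ _
  unfold Spec_solution
  exact solution_eq_alt strings n
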